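-- pv_equiv track=rewrite | github.com/ankurbhambri/DS-Algo | linkedlist/D_Berserk_Monsters.py | berserk_monsters
-- ===== SOURCE A (Python) =====
-- class Node:
--     def __init__(self, a, d, prev=None, nxt=None):
--         self.a = a
--         self.d = d
--         self.dg = 0
--         self.prev = prev
--         self.nxt = nxt
--
-- class DLL:
--     def __init__(self):
--         self.left = Node(-1, -1)
--         self.right = Node(-1, -1, self.left)
--         self.left.nxt = self.right
--
--     def add(self, node):
--
--         prev = self.right.prev
--         prev.nxt = node
--         node.prev = prev
--         node.nxt = self.right
--         self.right.prev = node
--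
--     def remove(self, node):
--         nxt = node.nxt
--         prev = node.prev
--
--         prev.nxt = nxt
--         nxt.prev = prev
--
-- def berserk_monsters(test_cases):
--     res = []
--     for n, a, d in test_cases:
--
--         dll = DLL()
--         deaths_per_round = []
--
--         for i in range(n):
--             dll.add(Node(a[i], d[i]))
--
--         while True:
--
--             cur = dll.left.nxt
--             dead = set([dll.left, dll.right])
--
--             while cur != dll.right:
--                 if cur.prev != dll.left and cur not in dead:
--                     cur.prev.dg += cur.a
--                 if cur.nxt != dll.right and cur not in dead:
--                     cur.nxt.dg += cur.a
--
--                 cur = cur.nxt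
--
--             cur = dll.left.nxt
--             dead_nodes = 0
--             while cur:
--                 if cur not in dead and cur.dg > cur.d:
--                     dead.add(cur)
--                     dll.remove(cur)
--                     dead_nodes += 1
--                 else:
--                     cur.dg = 0
--                 cur = cur.nxt
--
--             deaths_per_round.append(dead_nodes)
--
--             if dead_nodes == 0:
--                 break
--
--         deaths_per_round.extend([0] * (n - len(deaths_per_round)))
--         res.append(deaths_per_round)
--
--     return res
-- ===== SOURCE B (Python) =====
-- def berserk_monsters(test_cases):
--     # Event-driven simulation: after round 1, only monsters adjacent to a death
--     # can die; track candidates and splice dead monsters out of prev/next arrays.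
--     res = []
--     for n, a, d in test_cases:
--         prv = list(range(-1, n - 1))
--         nxt = list(range(1, n + 1))
--         alive = [True] * n
--         cand = list(range(n))
--         rounds = []
--         while True:
--             kill = [i for i in cand
--                     if alive[i]
--                     and (a[prv[i]] if prv[i] >= 0 else 0)
--                       + (a[nxt[i]] if nxt[i] < n else 0) > d[i]]
--             rounds.append(len(kill))
--             if not kill:
--                 break
--             for i in kill:
--                 alive[i] = False
--             nbrs = []
--             for i in kill:
--                 p, q = prv[i], nxt[i]
--                 if p >= 0:
--                     nxt[p] = q
--                     nbrs.append(p)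
--                 if q < n:
--                     prv[q] = p
--                     nbrs.append(q)
--             cand = sorted(set(nbrs))
--         rounds += [0] * (n - len(rounds))
--         res.append(rounds)
--     return res
-- ===== Notes on version B (the rewrite author's own statement) =====
-- stated objective: faster
-- what changed: Replaces A's per-round full rescan of the doubly-linked list (every alive monster re-accumulates damage into its neighbours each round) by an event-driven simulation: prev/next index arrays with splice-on-death, and a candidate set holding only the neighbours of the previous round's deaths, so after round one each round examines only those candidates instead of all alive monsters.
import Mathlib
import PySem

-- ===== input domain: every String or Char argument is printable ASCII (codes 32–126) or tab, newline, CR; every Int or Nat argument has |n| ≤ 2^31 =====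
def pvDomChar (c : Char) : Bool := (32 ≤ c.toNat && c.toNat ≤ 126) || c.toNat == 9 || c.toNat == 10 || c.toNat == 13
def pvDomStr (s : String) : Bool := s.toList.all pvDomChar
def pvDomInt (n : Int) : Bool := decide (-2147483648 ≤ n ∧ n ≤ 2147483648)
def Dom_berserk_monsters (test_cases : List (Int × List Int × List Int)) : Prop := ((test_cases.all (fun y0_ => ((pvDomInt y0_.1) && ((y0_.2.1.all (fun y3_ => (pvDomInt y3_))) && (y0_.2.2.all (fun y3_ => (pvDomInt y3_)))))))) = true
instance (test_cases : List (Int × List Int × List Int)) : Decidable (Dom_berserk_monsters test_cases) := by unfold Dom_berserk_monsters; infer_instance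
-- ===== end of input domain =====

-- B replaces A's full rescan of the whole linked list every round by an event-driven
-- simulation: after round one only monsters adjacent to a previous death can die, so B
-- keeps a candidate set (neighbours of last round's dead) and prev/next index arrays,
-- splicing dead monsters out; per round it examines only the candidates.

-- ===== PORT A =====
-- A's DLL (nodes in insertion order, sentinels excluded) is modelled as a list of nodes
-- (a, d, dg) in list order; pointer add/remove become append/removal from that list.
def pvAddDg (M : List (Int × Int × Int)) (k : Nat) (v : Int) : List (Int × Int × Int) :=
  let nd := M.getD k (0, 0, 0)
  M.set k (nd.1, nd.2.1, nd.2.2 + v)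

-- first inner while: each node adds its a to the dg of its prev/next non-sentinel neighbour
def pvADamage (L : List (Int × Int × Int)) : List (Int × Int × Int) :=
  (List.range L.length).foldl (fun M j =>
    let aj := (M.getD j (0, 0, 0)).1
    let M1 := if 0 < j then pvAddDg M (j - 1) aj else M
    if j + 1 < M1.length then pvAddDg M1 (j + 1) aj else M1) L

-- second inner while: remove nodes with dg > d (counting them), reset dg of survivors
def pvAReap (L : List (Int × Int × Int)) : List (Int × Int × Int) × Int :=
  L.foldl (fun acc nd =>
    if nd.2.2 > nd.2.1 then (acc.1, acc.2 + 1)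
    else (acc.1 ++ [(nd.1, nd.2.1, 0)], acc.2)) ([], 0)

-- outer 'while True'; fuel = (#nodes + 1) always suffices: every round before the last kills a node
def pvALoop : Nat → List (Int × Int × Int) → List Int → List Int
  | 0, _, rounds => rounds
  | fuel + 1, L, rounds =>
    let L1 := pvADamage L
    let p := pvAReap L1
    let rounds2 := rounds ++ [p.2]
    if p.2 = 0 then rounds2 else pvALoop fuel p.1 rounds2

def berserk_monsters (test_cases : List (Int × List Int × List Int)) : List (List Int) :=
  test_cases.foldl (fun res t =>
    let nodes := (PySem.List.pyRange 0 t.1 1).foldl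
      (fun L i => L ++ [(PySem.List.pyGetD t.2.1 i 0, PySem.List.pyGetD t.2.2 i 0, (0 : Int))]) []
    let rounds := pvALoop (nodes.length + 1) nodes []
    res ++ [rounds ++ List.replicate (t.1 - (rounds.length : Int)).toNat 0]) []

-- ===== PORT B =====
def pvGetI (xs : List Int) (i : Int) : Int := PySem.List.pyGetD xs i 0
def pvGetB (xs : List Bool) (i : Int) : Bool := PySem.List.pyGetD xs i false

-- a[prv[i]] if prv[i] >= 0 else 0) + (a[nxt[i]] if nxt[i] < n else 0)
def pvBDmg (n : Int) (a prv nxt : List Int) (i : Int) : Int :=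
  (if 0 ≤ pvGetI prv i then pvGetI a (pvGetI prv i) else 0) +
  (if pvGetI nxt i < n then pvGetI a (pvGetI nxt i) else 0)

-- body of 'for i in kill': splice i out of prv/nxt, collecting its live-side neighbours
def pvSplice (n : Int) (s : List Int × List Int × List Int) (i : Int) :
    List Int × List Int × List Int :=
  let p := pvGetI s.1 i
  let q := pvGetI s.2.1 i
  let s1 := if 0 ≤ p then (s.1, PySem.List.pySetD s.2.1 p q, s.2.2 ++ [p]) else s
  if q < n then (PySem.List.pySetD s1.1 q p, s1.2.1, s1.2.2 ++ [q]) else s1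

-- outer 'while True'; fuel = (#monsters + 1) always suffices (each earlier round kills one)
def pvBLoop (n : Int) (a d : List Int) :
    Nat → List Int → List Int → List Bool → List Int → List Int → List Int
  | 0, _, _, _, _, rounds => rounds
  | fuel + 1, prv, nxt, alive, cand, rounds =>
    let kill := cand.filter (fun i => pvGetB alive i && decide (pvGetI d i < pvBDmg n a prv nxt i))
    let rounds2 := rounds ++ [(kill.length : Int)]
    if kill = [] then rounds2 else
      let alive2 := kill.foldl (fun al i => PySem.List.pySetD al i false) alive
      let r := kill.foldl (pvSplice n) (prv, nxt, ([] : List Int))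
      pvBLoop n a d fuel r.1 r.2.1 alive2
        (PySem.List.sorted (PySem.Set.ofList r.2.2) (fun x => x) false) rounds2

def berserk_monsters_alt (test_cases : List (Int × List Int × List Int)) : List (List Int) :=
  test_cases.foldl (fun res t =>
    let n := t.1
    let prv := PySem.List.pyRange (-1) (n - 1) 1
    let nxt := PySem.List.pyRange 1 (n + 1) 1
    let alive := List.replicate n.toNat true
    let cand := PySem.List.pyRange 0 n 1
    let rounds := pvBLoop n t.2.1 t.2.2 (cand.length + 1) prv nxt alive cand []
    res ++ [rounds ++ List.replicate (n - (rounds.length : Int)).toNat 0]) []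

-- ===== PRECONDITION & SPEC =====
-- Pre_ excludes exactly the inputs where Python A raises IndexError: a test case whose
-- count n exceeds the length of its attack or defense list.
def Pre_berserk_monsters (test_cases : List (Int × List Int × List Int)) : Prop :=
  ∀ t ∈ test_cases, t.1 ≤ (t.2.1.length : Int) ∧ t.1 ≤ (t.2.2.length : Int)
instance (test_cases : List (Int × List Int × List Int)) : Decidable (Pre_berserk_monsters test_cases) := by unfold Pre_berserk_monsters; infer_instance

def pvWitness_berserk_monsters : (List (Int × List Int × List Int)) :=
  [(3, [2, 5, 1], [1, 6, 0])]

def Spec_berserk_monsters (test_cases : List (Int × List Int × List Int)) (out : List (List Int)) : Prop := out = berserk_monsters_alt test_cases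
instance (test_cases : List (Int × List Int × List Int)) (out : List (List Int)) : Decidable (Spec_berserk_monsters test_cases out) := by unfold Spec_berserk_monsters; infer_instance

-- ===== CLAIM (what is proved, stated in full; the proofs are below) =====
def Claim_equal_berserk_monsters : Prop := ∀ (test_cases : List (Int × List Int × List Int)), Dom_berserk_monsters test_cases → Pre_berserk_monsters test_cases → Spec_berserk_monsters test_cases (berserk_monsters test_cases)

-- ===== LEMMAS AND PROOFS =====

-- ---------- Layer 1: A's port equals a full-scan round model over (a,d) pairs ----------

def pvInj (p : Int × Int) : Int × Int × Int := (p.1, p.2, 0)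
def pvAtk (alive : List (Int × Int)) : List Int := alive.map (fun p => p.1)

-- dg of node j after the damage pass has processed positions < m
def pvPdg (alive : List (Int × Int)) (m j : Nat) : Int :=
  (if 1 ≤ j ∧ j - 1 < m then (pvAtk alive).getD (j - 1) 0 else 0) +
  (if j + 1 < m then (pvAtk alive).getD (j + 1) 0 else 0)

def pvNode (alive : List (Int × Int)) (m j : Nat) : Int × Int × Int :=
  ((pvAtk alive).getD j 0, (alive.getD j (0, 0)).2, pvPdg alive m j)

-- per-node damage, gathered from the two positional neighbours
def pvG (alive : List (Int × Int)) (j : Nat) : Int :=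
  (if 0 < j then (pvAtk alive).getD (j - 1) 0 else 0) + (pvAtk alive).getD (j + 1) 0

def pvMidRound (alive : List (Int × Int)) : List (Int × Int) × Int :=
  let atk := alive.map (fun p => p.1)
  let m := atk.length
  let dmg := (List.range m).map (fun i =>
    (if 0 < i then atk.getD (i - 1) 0 else 0) + atk.getD (i + 1) 0)
  let survivors := ((alive.zip dmg).filter (fun pd => pd.2 ≤ pd.1.2)).map (fun pd => pd.1)
  (survivors, (m : Int) - survivors.length)

def pvMidLoop : Nat → List (Int × Int) → List Int → List Int
  | 0, _, rounds => rounds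
  | fuel + 1, alive, rounds =>
    let p := pvMidRound alive
    let rounds2 := rounds ++ [p.2]
    if p.2 = 0 then rounds2 else pvMidLoop fuel p.1 rounds2

theorem pv_addDg_map_range (G : Nat → Int × Int × Int) (n k : Nat) (hk : k < n) (v : Int) :
    pvAddDg ((List.range n).map G) k v =
    (List.range n).map (fun j => if j = k then ((G k).1, (G k).2.1, (G k).2.2 + v) else G j) := by
  unfold pvAddDg
  apply List.ext_getElem (by simp)
  intro j hj hj2
  simp only [PySem.List.getD_map_range G n k _ hk]
  simp [List.getElem_set]
  rcases eq_or_ne j k with h | h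
  · simp [h]
  · simp [h, Ne.symm h]

theorem pvPdg_at_pred (alive : List (Int × Int)) (m : Nat) (h0 : 0 < m) :
    pvPdg alive (m + 1) (m - 1) = pvPdg alive m (m - 1) + (pvAtk alive).getD m 0 := by
  unfold pvPdg
  rw [show m - 1 + 1 = m from by omega]
  rw [if_pos (show m < m + 1 from by omega), if_neg (show ¬ m < m from by omega)]
  rw [if_congr (show (1 ≤ m - 1 ∧ m - 1 - 1 < m + 1) ↔ (1 ≤ m - 1 ∧ m - 1 - 1 < m) from by omega) rfl rfl]
  ring

theorem pvPdg_at_succ (alive : List (Int × Int)) (m : Nat) :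
    pvPdg alive (m + 1) (m + 1) = pvPdg alive m (m + 1) + (pvAtk alive).getD m 0 := by
  unfold pvPdg
  rw [show m + 1 - 1 = m from by omega]
  rw [if_pos (show 1 ≤ m + 1 ∧ m < m + 1 from by omega),
      if_neg (show ¬ (1 ≤ m + 1 ∧ m < m) from by omega),
      if_neg (show ¬ (m + 1 + 1 < m + 1) from by omega),
      if_neg (show ¬ (m + 1 + 1 < m) from by omega)]
  ring

theorem pvPdg_frozen (alive : List (Int × Int)) (m j : Nat) (hp : j + 1 ≠ m) (hs : j ≠ m + 1) :
    pvPdg alive (m + 1) j = pvPdg alive m j := by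
  unfold pvPdg
  rw [if_congr (show (1 ≤ j ∧ j - 1 < m + 1) ↔ (1 ≤ j ∧ j - 1 < m) from by omega) rfl rfl,
      if_congr (show (j + 1 < m + 1) ↔ (j + 1 < m) from by omega) rfl rfl]

theorem pvNode_frozen (alive : List (Int × Int)) (m j : Nat) (hp : j + 1 ≠ m) (hs : j ≠ m + 1) :
    pvNode alive m j = pvNode alive (m + 1) j := by
  unfold pvNode
  rw [pvPdg_frozen alive m j hp hs]

theorem pv_damage_prefix (alive : List (Int × Int)) (m : Nat) (hm : m ≤ alive.length) :
    (List.range m).foldl (fun M j =>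
      let aj := (M.getD j (0, 0, 0)).1
      let M1 := if 0 < j then pvAddDg M (j - 1) aj else M
      if j + 1 < M1.length then pvAddDg M1 (j + 1) aj else M1) (alive.map pvInj) =
    (List.range alive.length).map (pvNode alive m) := by
  induction m with
  | zero =>
    apply List.ext_getElem (by simp)
    intro j hj hj2
    have hj' : j < alive.length := by simpa using hj2
    simp [pvNode, pvInj, pvPdg, pvAtk, List.getElem?_eq_getElem hj']
  | succ m ih =>
    have hm' : m ≤ alive.length := by omega
    have hmlt : m < alive.length := by omega
    rw [List.range_succ, List.foldl_append, ih hm']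
    simp only [List.foldl_cons, List.foldl_nil]
    simp only [PySem.List.getD_map_range (pvNode alive m) alive.length m _ hmlt]
    have hne : m + 1 ≠ m - 1 := by omega
    by_cases h0 : 0 < m
    · rw [if_pos h0, pv_addDg_map_range _ _ (m - 1) (by omega)]
      simp only [List.length_map, List.length_range]
      by_cases h1 : m + 1 < alive.length
      · rw [if_pos h1, pv_addDg_map_range _ _ (m + 1) h1]
        apply List.map_congr_left
        intro j hjm
        rw [List.mem_range] at hjm
        dsimp only
        rcases eq_or_ne j (m + 1) with rfl | hj1
        · rw [if_pos rfl, if_neg hne]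
          unfold pvNode
          dsimp only
          rw [pvPdg_at_succ]
        · rw [if_neg hj1]
          rcases eq_or_ne j (m - 1) with rfl | hj2
          · unfold pvNode
            dsimp only
            rw [pvPdg_at_pred alive m h0, if_pos rfl]
          · rw [if_neg hj2]
            exact pvNode_frozen alive m j (by omega) hj1
      · rw [if_neg h1]
        apply List.map_congr_left
        intro j hjm
        rw [List.mem_range] at hjm
        dsimp only
        rcases eq_or_ne j (m - 1) with rfl | hj2
        · unfold pvNode
          dsimp only
          rw [pvPdg_at_pred alive m h0, if_pos rfl]
        · rw [if_neg hj2]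
          exact pvNode_frozen alive m j (by omega) (by omega)
    · rw [if_neg h0]
      simp only [List.length_map, List.length_range]
      by_cases h1 : m + 1 < alive.length
      · rw [if_pos h1, pv_addDg_map_range _ _ (m + 1) h1]
        apply List.map_congr_left
        intro j hjm
        rw [List.mem_range] at hjm
        dsimp only
        rcases eq_or_ne j (m + 1) with rfl | hj1
        · rw [if_pos rfl]
          unfold pvNode
          dsimp only
          rw [pvPdg_at_succ]
        · rw [if_neg hj1]
          exact pvNode_frozen alive m j (by omega) hj1
      · rw [if_neg h1]
        apply List.map_congr_left
        intro j hjm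
        rw [List.mem_range] at hjm
        exact pvNode_frozen alive m j (by omega) (by omega)

theorem pv_damage_eq (alive : List (Int × Int)) :
    pvADamage (alive.map pvInj) =
    (List.range alive.length).map
      (fun j => ((pvAtk alive).getD j 0, (alive.getD j (0, 0)).2, pvG alive j)) := by
  unfold pvADamage
  rw [List.length_map, pv_damage_prefix alive alive.length le_rfl]
  apply List.map_congr_left
  intro j hj
  rw [List.mem_range] at hj
  unfold pvNode pvPdg pvG
  rw [if_congr (show (1 ≤ j ∧ j - 1 < alive.length) ↔ (0 < j) from by omega) rfl rfl]
  by_cases h2 : j + 1 < alive.length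
  · rw [if_pos h2]
  · have hlen : (pvAtk alive).length ≤ j + 1 := by
      simp only [pvAtk, List.length_map]
      omega
    rw [if_neg h2, List.getD_eq_default _ _ hlen]

theorem pv_reap_fold (L acc : List (Int × Int × Int)) (c : Int) :
    L.foldl (fun acc nd =>
      if nd.2.2 > nd.2.1 then (acc.1, acc.2 + 1)
      else (acc.1 ++ [(nd.1, nd.2.1, 0)], acc.2)) (acc, c) =
    (acc ++ (L.filter (fun nd => decide (nd.2.2 ≤ nd.2.1))).map (fun nd => (nd.1, nd.2.1, 0)),
     c + (L.countP (fun nd => decide (nd.2.1 < nd.2.2)) : Int)) := by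
  induction L generalizing acc c with
  | nil => simp
  | cons x L ih =>
    simp only [List.foldl_cons]
    by_cases hx : x.2.1 < x.2.2
    · rw [if_pos hx, ih]
      simp [hx, not_le.mpr hx]
      ring
    · rw [if_neg hx, ih]
      simp [hx, not_lt.mp hx]

theorem pvAtk_getD (alive : List (Int × Int)) (j : Nat) (hj : j < alive.length) :
    (pvAtk alive).getD j 0 = (alive.getD j (0, 0)).1 := by
  have hj' : j < (pvAtk alive).length := by simpa [pvAtk] using hj
  rw [List.getD_eq_getElem _ _ hj', List.getD_eq_getElem _ _ hj]
  simp [pvAtk]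

theorem pv_zip_dmg (alive : List (Int × Int)) :
    alive.zip ((List.range alive.length).map (pvG alive)) =
    (List.range alive.length).map (fun j => (alive.getD j (0, 0), pvG alive j)) := by
  apply List.ext_getElem (by simp)
  intro j hj hj2
  have hjn : j < alive.length := by simpa using hj2
  simp [List.getElem_zip, List.getElem?_eq_getElem hjn]

theorem pv_countP_not_add (l : List Nat) (q : Nat → Bool) :
    l.countP (fun a => !q a) + l.countP q = l.length := by
  induction l with
  | nil => simp
  | cons x l ih => by_cases h : q x <;> simp [h] <;> omega

theorem pv_round_eq (alive : List (Int × Int)) :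
    pvAReap (pvADamage (alive.map pvInj)) = ((pvMidRound alive).1.map pvInj, (pvMidRound alive).2) := by
  unfold pvAReap pvMidRound
  rw [pv_damage_eq alive, pv_reap_fold]
  have hdmg : (List.range (alive.map (fun p => p.1)).length).map (fun i =>
      (if 0 < i then (alive.map (fun p => p.1)).getD (i - 1) 0 else 0) +
        (alive.map (fun p => p.1)).getD (i + 1) 0) =
      (List.range alive.length).map (pvG alive) := by
    simp only [List.length_map]
    rfl
  dsimp only
  rw [hdmg, pv_zip_dmg alive, List.filter_map, List.map_map, List.filter_map, List.map_map,
      List.countP_map]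
  rw [Prod.ext_iff]
  simp only [Function.comp_def, List.nil_append, List.map_map]
  refine ⟨?_, ?_⟩
  · apply List.map_congr_left
    intro j hjf
    have hjn : j < alive.length := List.mem_range.mp (List.mem_of_mem_filter hjf)
    simp only [pvInj]
    rw [pvAtk_getD alive j hjn]
  · simp only [List.length_map, ← List.countP_eq_length_filter]
    have hsplit := pv_countP_not_add (List.range alive.length)
      (fun j => decide (pvG alive j ≤ (alive.getD j (0, 0)).2))
    have hcong : (List.range alive.length).countP
        (fun j => !decide (pvG alive j ≤ (alive.getD j (0, 0)).2)) =
        (List.range alive.length).countP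
        (fun j => decide ((alive.getD j (0, 0)).2 < pvG alive j)) := by
      apply List.countP_congr
      intro j _
      simp [not_le]
    rw [hcong, List.length_range] at hsplit
    omega

theorem pv_loop_eq (fuel : Nat) (alive : List (Int × Int)) (rounds : List Int) :
    pvALoop fuel (alive.map pvInj) rounds = pvMidLoop fuel alive rounds := by
  induction fuel generalizing alive rounds with
  | zero => rfl
  | succ f ih =>
    simp only [pvALoop, pvMidLoop, pv_round_eq alive]
    by_cases h : (pvMidRound alive).2 = 0 <;> simp [h, ih]

def pvF (a d : List Int) (i : Int) : Int × Int := (pvGetI a i, pvGetI d i)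

-- value-based successor / predecessor of i in the alive-index list L (n / -1 at the ends)
def pvSuccV (n : Int) : List Int → Int → Int
  | [], _ => n
  | x :: t, i => if x = i then t.headD n else pvSuccV n t i

def pvPredV : Int → List Int → Int → Int
  | p, [], _ => p
  | p, x :: t, i => if x = i then p else pvPredV x t i

theorem pvSuccV_cons_self (n x : Int) (t : List Int) : pvSuccV n (x :: t) x = t.headD n := by
  simp [pvSuccV]

theorem pvSuccV_cons_ne (n x i : Int) (t : List Int) (h : x ≠ i) :
    pvSuccV n (x :: t) i = pvSuccV n t i := by
  simp [pvSuccV, h]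

theorem pvPredV_cons_self (p x : Int) (t : List Int) : pvPredV p (x :: t) x = p := by
  simp [pvPredV]

theorem pvPredV_cons_ne (p x i : Int) (t : List Int) (h : x ≠ i) :
    pvPredV p (x :: t) i = pvPredV x t i := by
  simp [pvPredV, h]

def pvDmgV (n : Int) (a : List Int) (L : List Int) (i : Int) : Int :=
  (if 0 ≤ pvPredV (-1) L i then pvGetI a (pvPredV (-1) L i) else 0) +
  (if pvSuccV n L i < n then pvGetI a (pvSuccV n L i) else 0)

def pvIdxRound (n : Int) (a d : List Int) (L : List Int) : List Int × Int :=
  let surv := L.filter (fun i => decide (pvDmgV n a L i ≤ pvGetI d i))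
  (surv, (L.length : Int) - surv.length)

def pvIdxLoop (n : Int) (a d : List Int) : Nat → List Int → List Int → List Int
  | 0, _, rounds => rounds
  | fuel + 1, L, rounds =>
    let p := pvIdxRound n a d L
    let rounds2 := rounds ++ [p.2]
    if p.2 = 0 then rounds2 else pvIdxLoop n a d fuel p.1 rounds2

theorem pvSuccV_getElem (n : Int) (L : List Int) (hnd : L.Nodup) (t : Nat) (ht : t < L.length) :
    pvSuccV n L L[t] = if h : t + 1 < L.length then L[t + 1] else n := by
  induction L generalizing t with
  | nil => simp at ht
  | cons x tl ih =>
    obtain ⟨hx, hnd'⟩ := List.nodup_cons.mp hnd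
    cases t with
    | zero =>
      simp only [List.getElem_cons_zero, pvSuccV]
      cases tl with
      | nil => simp
      | cons y t' => simp
    | succ k =>
      have hk : k < tl.length := by simpa using ht
      have hxne : x ≠ tl[k] := fun h => hx (h ▸ List.getElem_mem hk)
      simp only [List.getElem_cons_succ, pvSuccV, if_neg hxne]
      rw [ih hnd' k hk]
      by_cases h1 : k + 1 < tl.length
      · rw [dif_pos h1, dif_pos (by simpa using Nat.succ_lt_succ h1)]
      · rw [dif_neg h1, dif_neg (by simp; omega)]


theorem pvPredV_getElem (p : Int) (L : List Int) (hnd : L.Nodup) (t : Nat) (ht : t < L.length) :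
    pvPredV p L L[t] = if h : 0 < t then L[t - 1] else p := by
  induction L generalizing t p with
  | nil => simp at ht
  | cons x tl ih =>
    obtain ⟨hx, hnd'⟩ := List.nodup_cons.mp hnd
    cases t with
    | zero =>
      simp [pvPredV]
    | succ k =>
      have hk : k < tl.length := by simpa using ht
      have hxne : x ≠ tl[k] := fun h => hx (h ▸ List.getElem_mem hk)
      simp only [List.getElem_cons_succ, pvPredV, if_neg hxne]
      rw [ih x hnd' k hk]
      cases k with
      | zero => simp
      | succ k' =>
        rw [dif_pos (Nat.succ_pos k'), dif_pos (Nat.succ_pos (k'+1))]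
        simp




-- ---------- Layer 3: the index model equals B's candidate/pointer simulation ----------

-- prv/nxt encode the chain of alive indices L (ascending, in [0,n)), started at accumulator p
def pvChain (n : Int) (prv nxt : List Int) : Int → List Int → Prop
  | _, [] => True
  | p, x :: t => p < x ∧ 0 ≤ x ∧ x < n ∧ pvGetI prv x = p ∧ pvGetI nxt x = t.headD n ∧
      pvChain n prv nxt x t

theorem pv_get_set_self {α : Type} (xs : List α) (dflt v : α) (k : Int)
    (hk : 0 ≤ k) (hkl : k < (xs.length : Int)) :
    PySem.List.pyGetD (PySem.List.pySetD xs k v) k dflt = v := by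
  have hkn : k.toNat < xs.length := by omega
  rw [PySem.List.pySetD_of_nonneg xs v hk,
      PySem.List.pyGetD_eq_getElem _ dflt hk (by simpa using hkl)]
  simp


theorem pv_get_set_ne {α : Type} (xs : List α) (dflt v : α) (k i : Int)
    (hk : 0 ≤ k) (hi : 0 ≤ i) (hne : i ≠ k) :
    PySem.List.pyGetD (PySem.List.pySetD xs k v) i dflt = PySem.List.pyGetD xs i dflt := by
  rw [PySem.List.pySetD_of_nonneg xs v hk, PySem.List.pyGetD_of_nonneg _ dflt hi,
      PySem.List.pyGetD_of_nonneg _ dflt hi]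
  have : k.toNat ≠ i.toNat := by omega
  unfold List.getD
  rw [List.getElem?_set_ne this]


theorem pvChain_pairwise (n : Int) (prv nxt : List Int) :
    ∀ (L : List Int) (p : Int), pvChain n prv nxt p L →
    L.Pairwise (· < ·) ∧ ∀ x ∈ L, p < x ∧ 0 ≤ x ∧ x < n := by
  intro L
  induction L with
  | nil => intro p _; exact ⟨List.Pairwise.nil, by simp⟩
  | cons x t ih =>
    intro p h
    obtain ⟨hpx, hx0, hxn, _, _, hc⟩ := h
    obtain ⟨hpw, hmem⟩ := ih x hc
    refine ⟨List.pairwise_cons.mpr ⟨fun y hy => (hmem y hy).1, hpw⟩, ?_⟩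
    intro y hy
    rcases List.mem_cons.mp hy with rfl | hy
    · exact ⟨hpx, hx0, hxn⟩
    · obtain ⟨h1, h2, h3⟩ := hmem y hy
      exact ⟨lt_trans hpx h1, h2, h3⟩


theorem pvChain_read (n : Int) (prv nxt : List Int) :
    ∀ (L : List Int) (p : Int), pvChain n prv nxt p L → ∀ i ∈ L,
    pvGetI prv i = pvPredV p L i ∧ pvGetI nxt i = pvSuccV n L i := by
  intro L
  induction L with
  | nil => intro p _ i hi; simp at hi
  | cons x t ih =>
    intro p h i hi
    obtain ⟨hpx, hx0, hxn, hpr, hnr, hc⟩ := h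
    rcases List.mem_cons.mp hi with rfl | hi
    · have hxt : i ∉ t := by
        intro hmem
        exact absurd ((pvChain_pairwise n prv nxt t i hc).2 i hmem).1 (lt_irrefl i)
      simp [pvPredV, pvSuccV, hpr, hnr]
    · have hne : x ≠ i := by
        intro h
        exact absurd ((pvChain_pairwise n prv nxt t x hc).2 i hi).1 (by rw [h]; exact lt_irrefl i)
      simpa [pvPredV, pvSuccV, hne] using ih x hc i hi


theorem pvChain_congr (n : Int) (prv nxt prv' nxt' : List Int) :
    ∀ (L : List Int) (p : Int),
    (∀ x ∈ L, pvGetI prv' x = pvGetI prv x ∧ pvGetI nxt' x = pvGetI nxt x) →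
    pvChain n prv nxt p L → pvChain n prv' nxt' p L := by
  intro L
  induction L with
  | nil => intro p _ _; trivial
  | cons x t ih =>
    intro p hr h
    obtain ⟨hpx, hx0, hxn, hpr, hnr, hc⟩ := h
    obtain ⟨hr1, hr2⟩ := hr x (List.mem_cons_self)
    exact ⟨hpx, hx0, hxn, hr1.trans hpr, hr2.trans hnr,
      ih x (fun y hy => hr y (List.mem_cons_of_mem x hy)) hc⟩


theorem pvSuccV_mem (n : Int) : ∀ (L : List Int) (i : Int),
    pvSuccV n L i = n ∨ pvSuccV n L i ∈ L := by
  intro L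
  induction L with
  | nil => intro i; left; rfl
  | cons x t ih =>
    intro i
    by_cases h : x = i
    · simp only [pvSuccV, if_pos h]
      cases t with
      | nil => left; rfl
      | cons y t' => right; simp
    · simp only [pvSuccV, if_neg h]
      rcases ih i with h1 | h1
      · left; exact h1
      · right; exact List.mem_cons_of_mem x h1


theorem pvPredV_mem : ∀ (L : List Int) (p i : Int),
    pvPredV p L i = p ∨ pvPredV p L i ∈ L := by
  intro L
  induction L with
  | nil => intro p i; left; rfl
  | cons x t ih =>
    intro p i
    by_cases h : x = i
    · left; simp [pvPredV, h]
    · simp only [pvPredV, if_neg h]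
      rcases ih x i with h1 | h1
      · right; simp [h1]
      · right; exact List.mem_cons_of_mem x h1


theorem pvPredV_acc (i : Int) : ∀ (t : List Int) (a b : Int),
    i ∈ t → t.head? ≠ some i → pvPredV a t i = pvPredV b t i := by
  intro t
  induction t with
  | nil => intro a b hi _; simp at hi
  | cons x t' ih =>
    intro a b hi hhd
    have hne : x ≠ i := by
      intro h; exact hhd (by simp [h])
    simp only [pvPredV, if_neg hne]


-- succ i = j  ⇒  pred j = i   (and conversely), in a nodup list bounded by n
theorem pv_succ_pred (n : Int) : ∀ (L : List Int) (p i j : Int), L.Nodup → (∀ x ∈ L, x < n) →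
    i ∈ L → j ∈ L → pvSuccV n L i = j → pvPredV p L j = i := by
  intro L
  induction L with
  | nil => intro p i j _ _ hi; simp at hi
  | cons x t ih =>
    intro p i j hnd hb hi hj hs
    obtain ⟨hx, hnd'⟩ := List.nodup_cons.mp hnd
    by_cases hxi : x = i
    · subst hxi
      rw [pvSuccV, if_pos rfl] at hs
      cases t with
      | nil =>
        exfalso
        rcases List.mem_cons.mp hj with rfl | hjt
        · have := hb _ List.mem_cons_self
          simp at hs
          omega
        · simp at hjt
      | cons y t' =>
        simp only [List.headD_cons] at hs
        subst hs
        have hxy : x ≠ y := fun h => hx (h ▸ List.mem_cons_self)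
        rw [pvPredV_cons_ne p x y _ hxy, pvPredV_cons_self]
    · have hit : i ∈ t := (List.mem_cons.mp hi).resolve_left (fun h => hxi h.symm)
      rw [pvSuccV, if_neg hxi] at hs
      have hjt : j ∈ t := by
        rcases pvSuccV_mem n t i with h1 | h1
        · exfalso
          have := hb j hj
          omega
        · exact hs ▸ h1
      have hxj : x ≠ j := fun h => hx (h ▸ hjt)
      rw [pvPredV, if_neg hxj]
      exact ih x i j hnd' (fun y hy => hb y (List.mem_cons_of_mem x hy)) hit hjt hs

theorem pv_pred_succ (n : Int) : ∀ (L : List Int) (p i j : Int), L.Nodup → p ∉ L →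
    i ∈ L → j ∈ L → pvPredV p L i = j → pvSuccV n L j = i := by
  intro L
  induction L with
  | nil => intro p i j _ _ hi; simp at hi
  | cons x t ih =>
    intro p i j hnd hp hi hj hpr
    obtain ⟨hx, hnd'⟩ := List.nodup_cons.mp hnd
    by_cases hxi : x = i
    · subst hxi
      rw [pvPredV, if_pos rfl] at hpr
      exact absurd hj (hpr ▸ hp)
    · have hit : i ∈ t := (List.mem_cons.mp hi).resolve_left (fun h => hxi h.symm)
      rw [pvPredV, if_neg hxi] at hpr
      by_cases hxj : x = j
      · subst hxj
        rw [pvSuccV, if_pos rfl]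
        cases t with
        | nil => simp at hit
        | cons y t' =>
          by_cases hyi : y = i
          · simp [hyi]
          · exfalso
            have hit' : i ∈ t' := (List.mem_cons.mp hit).resolve_left (fun h => hyi h.symm)
            rw [pvPredV, if_neg hyi] at hpr
            rcases pvPredV_mem t' y i with h1 | h1
            · exact hx (by rw [hpr] at h1; exact h1 ▸ List.mem_cons_self)
            · exact hx (hpr ▸ List.mem_cons_of_mem y h1)
      · have hjt : j ∈ t := (List.mem_cons.mp hj).resolve_left (fun h => hxj h.symm)
        rw [pvSuccV, if_neg hxj]
        exact ih x i j hnd' hx hit hjt hpr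

theorem pvSuccV_erase (n : Int) : ∀ (L : List Int) (i j : Int), L.Nodup → (∀ x ∈ L, x < n) →
    i ∈ L → j ∈ L → i ≠ j →
    pvSuccV n (L.erase j) i = if pvSuccV n L i = j then pvSuccV n L j else pvSuccV n L i := by
  intro L
  induction L with
  | nil => intro i j _ _ hi; simp at hi
  | cons x t ih =>
    intro i j hnd hb hi hj hij
    obtain ⟨hx, hnd'⟩ := List.nodup_cons.mp hnd
    have hbt : ∀ y ∈ t, y < n := fun y hy => hb y (List.mem_cons_of_mem x hy)
    by_cases hxj : x = j
    · subst hxj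
      rw [List.erase_cons_head]
      have hit : i ∈ t := (List.mem_cons.mp hi).resolve_left hij
      have hxi : x ≠ i := fun h => hij h.symm
      rw [pvSuccV_cons_ne n x i t hxi]
      have hcond : pvSuccV n t i ≠ x := by
        rcases pvSuccV_mem n t i with h1 | h1
        · have := hb x List.mem_cons_self
          omega
        · exact fun h => hx (h ▸ h1)
      rw [if_neg hcond]
    · rw [List.erase_cons_tail (by simp only [beq_iff_eq]; omega)]
      have hjt : j ∈ t := (List.mem_cons.mp hj).resolve_left (fun h => hxj h.symm)
      by_cases hxi : x = i
      · subst hxi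
        rw [pvSuccV_cons_self, pvSuccV_cons_self, pvSuccV_cons_ne n x j t hxj]
        cases t with
        | nil => simp at hjt
        | cons y t' =>
          by_cases hyj : y = j
          · subst hyj
            rw [List.erase_cons_head]
            simp only [List.headD_cons]
            simp only [if_true, pvSuccV_cons_self]
          · rw [List.erase_cons_tail (by simp only [beq_iff_eq]; omega)]
            simp only [List.headD_cons]
            rw [if_neg hyj]
      · have hit : i ∈ t := (List.mem_cons.mp hi).resolve_left (fun h => hxi h.symm)
        rw [pvSuccV_cons_ne n x i _ hxi, pvSuccV_cons_ne n x i t hxi, pvSuccV_cons_ne n x j t hxj]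
        exact ih i j hnd' hbt hit hjt hij

theorem pvPredV_erase : ∀ (L : List Int) (p i j : Int), L.Pairwise (· < ·) → (∀ x ∈ L, p < x) →
    i ∈ L → j ∈ L → i ≠ j →
    pvPredV p (L.erase j) i = if pvPredV p L i = j then pvPredV p L j else pvPredV p L i := by
  intro L
  induction L with
  | nil => intro p i j _ _ hi; simp at hi
  | cons x t ih =>
    intro p i j hpw hp hi hj hij
    obtain ⟨hlt, hpw'⟩ := List.pairwise_cons.mp hpw
    have hx : x ∉ t := fun h => absurd (hlt x h) (lt_irrefl x)
    by_cases hxj : x = j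
    · subst hxj
      rw [List.erase_cons_head]
      have hit : i ∈ t := (List.mem_cons.mp hi).resolve_left hij
      have hxi : x ≠ i := fun h => hij h.symm
      rw [pvPredV_cons_ne p x i t hxi, pvPredV_cons_self]
      cases t with
      | nil => simp at hit
      | cons y t' =>
        by_cases hyi : y = i
        · subst hyi
          rw [pvPredV_cons_self, pvPredV_cons_self, if_pos rfl]
        · have hit' : i ∈ t' := (List.mem_cons.mp hit).resolve_left (fun h => hyi h.symm)
          have hcond : pvPredV y t' i ≠ x := by
            rcases pvPredV_mem t' y i with h1 | h1
            · rw [h1]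
              exact fun h => hx (h ▸ List.mem_cons_self)
            · exact fun h => hx (h ▸ List.mem_cons_of_mem y h1)
          rw [pvPredV_cons_ne x y i t' hyi, pvPredV_cons_ne p y i t' hyi, if_neg hcond]
    · rw [List.erase_cons_tail (by simp only [beq_iff_eq]; omega)]
      have hjt : j ∈ t := (List.mem_cons.mp hj).resolve_left (fun h => hxj h.symm)
      by_cases hxi : x = i
      · subst hxi
        rw [pvPredV_cons_self, pvPredV_cons_self]
        have hpj : p ≠ j := by
          have := hp j hj
          omega
        rw [if_neg hpj]
      · have hit : i ∈ t := (List.mem_cons.mp hi).resolve_left (fun h => hxi h.symm)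
        rw [pvPredV_cons_ne p x i _ hxi, pvPredV_cons_ne p x i t hxi, pvPredV_cons_ne p x j t hxj]
        exact ih x i j hpw' hlt hit hjt hij

theorem pvSuccV_filter (n : Int) : ∀ (L : List Int) (keep : Int → Bool) (i : Int),
    L.Nodup → (∀ x ∈ L, x < n) → i ∈ L → keep i = true →
    (pvSuccV n L i = n ∨ keep (pvSuccV n L i) = true) →
    pvSuccV n (L.filter keep) i = pvSuccV n L i := by
  intro L
  induction L with
  | nil => intro keep i _ _ hi; simp at hi
  | cons x t ih =>
    intro keep i hnd hb hi hki hs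
    obtain ⟨hx, hnd'⟩ := List.nodup_cons.mp hnd
    have hbt : ∀ y ∈ t, y < n := fun y hy => hb y (List.mem_cons_of_mem x hy)
    by_cases hxi : x = i
    · subst hxi
      rw [List.filter_cons_of_pos hki, pvSuccV_cons_self, pvSuccV_cons_self]
      rw [pvSuccV_cons_self] at hs
      cases t with
      | nil => simp
      | cons y t' =>
        simp only [List.headD_cons] at hs ⊢
        have hyk : keep y = true := by
          rcases hs with h1 | h1
          · have := hbt y List.mem_cons_self
            omega
          · exact h1
        rw [List.filter_cons_of_pos hyk]
        simp
    · have hit : i ∈ t := (List.mem_cons.mp hi).resolve_left (fun h => hxi h.symm)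
      have hs' : pvSuccV n t i = n ∨ keep (pvSuccV n t i) = true := by
        rwa [pvSuccV_cons_ne n x i t hxi] at hs
      rw [pvSuccV_cons_ne n x i t hxi]
      cases hkx : keep x
      · rw [List.filter_cons_of_neg (by simp [hkx])]
        exact ih keep i hnd' hbt hit hki hs'
      · rw [List.filter_cons_of_pos hkx, pvSuccV_cons_ne n x i _ hxi]
        exact ih keep i hnd' hbt hit hki hs' 

theorem pvPredV_filter : ∀ (L : List Int) (keep : Int → Bool) (p i : Int),
    L.Pairwise (· < ·) → (∀ x ∈ L, p < x) → i ∈ L → keep i = true →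
    (pvPredV p L i = p ∨ keep (pvPredV p L i) = true) →
    pvPredV p (L.filter keep) i = pvPredV p L i := by
  intro L
  induction L with
  | nil => intro keep p i _ _ hi; simp at hi
  | cons x t ih =>
    intro keep p i hpw hp hi hki hs
    obtain ⟨hlt, hpw'⟩ := List.pairwise_cons.mp hpw
    have hpx : p < x := hp x List.mem_cons_self
    have hpt : ∀ y ∈ t, p < y := fun y hy => hp y (List.mem_cons_of_mem x hy)
    by_cases hxi : x = i
    · subst hxi
      rw [List.filter_cons_of_pos hki, pvPredV_cons_self, pvPredV_cons_self]
    · have hit : i ∈ t := (List.mem_cons.mp hi).resolve_left (fun h => hxi h.symm)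
      rw [pvPredV_cons_ne p x i t hxi] at hs ⊢
      cases hkx : keep x
      · rw [List.filter_cons_of_neg (by simp [hkx])]
        have hne : pvPredV x t i ≠ x := by
          intro h
          rw [h] at hs
          rcases hs with h1 | h1
          · omega
          · rw [hkx] at h1
            exact Bool.false_ne_true h1
        have hhd : t.head? ≠ some i := by
          intro hh
          cases t with
          | nil => simp at hh
          | cons y t' =>
            simp only [List.head?_cons, Option.some.injEq] at hh
            subst hh
            exact hne (pvPredV_cons_self _ _ _)
        have hacc : pvPredV x t i = pvPredV p t i := pvPredV_acc i t x p hit hhd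
        rw [hacc]
        exact ih keep p i hpw' hpt hit hki (by rwa [hacc] at hs)
      · rw [List.filter_cons_of_pos hkx, pvPredV_cons_ne p x i _ hxi]
        have hs' : pvPredV x t i = x ∨ keep (pvPredV x t i) = true := by
          rcases pvPredV_mem t x i with h1 | h1
          · exact Or.inl h1
          · rcases hs with h2 | h2
            · exfalso
              have := hpt _ h1
              omega
            · exact Or.inr h2
        exact ih keep x i hpw' hlt hit hki hs' 

-- splicing one member out of the chain
theorem pvGetI_set_self (xs : List Int) (v k : Int) (hk : 0 ≤ k) (hkl : k < (xs.length : Int)) :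
    pvGetI (PySem.List.pySetD xs k v) k = v :=
  pv_get_set_self xs 0 v k hk hkl

theorem pvGetI_set_ne (xs : List Int) (v k i : Int) (hk : 0 ≤ k) (hi : 0 ≤ i) (hne : i ≠ k) :
    pvGetI (PySem.List.pySetD xs k v) i = pvGetI xs i :=
  pv_get_set_ne xs 0 v k i hk hi hne

theorem pv_splice_one (n : Int) (prv nxt : List Int)
    (hlp : prv.length = n.toNat) (hln : nxt.length = n.toNat) :
    ∀ (L : List Int) (p0 j : Int), pvChain n prv nxt p0 L → j ∈ L → -1 ≤ p0 → p0 < n →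
    pvChain n
      (if pvGetI nxt j < n then PySem.List.pySetD prv (pvGetI nxt j) (pvGetI prv j) else prv)
      (if 0 ≤ pvGetI prv j then PySem.List.pySetD nxt (pvGetI prv j) (pvGetI nxt j) else nxt)
      p0 (L.erase j) := by
  intro L
  induction L with
  | nil => intro p0 j _ hj _ _; simp at hj
  | cons x t ih =>
    intro p0 j hch hj hm1 hmn
    obtain ⟨hpx, hx0, hxn, hpr, hnr, hc⟩ := hch
    by_cases hxj : x = j
    · subst hxj
      rw [List.erase_cons_head, hpr, hnr]
      cases t with
      | nil =>
        split
        · split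
          · trivial
          · trivial
        · split
          · trivial
          · trivial
      | cons y t' =>
        obtain ⟨hxy, hy0, hyn, hpry, hnry, hc'⟩ := hc
        simp only [List.headD_cons]
        rw [if_pos hyn]
        have hylp : y < (prv.length : Int) := by rw [hlp]; omega
        refine ⟨by omega, hy0, hyn, ?_, ?_, ?_⟩
        · exact pvGetI_set_self prv p0 y hy0 hylp
        · by_cases hp0 : 0 ≤ p0
          · rw [if_pos hp0, pvGetI_set_ne nxt y p0 y hp0 hy0 (by omega)]
            exact hnry
          · rw [if_neg hp0]
            exact hnry
        · apply pvChain_congr n prv nxt _ _ t' y _ hc'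
          intro z hz
          have hzb := (pvChain_pairwise n prv nxt t' y hc').2 z hz
          refine ⟨pvGetI_set_ne prv p0 y z hy0 hzb.2.1 (by omega), ?_⟩
          by_cases hp0 : 0 ≤ p0
          · rw [if_pos hp0]
            exact pvGetI_set_ne nxt y p0 z hp0 hzb.2.1 (by omega)
          · rw [if_neg hp0]
    · have hjt : j ∈ t := (List.mem_cons.mp hj).resolve_left (fun h => hxj h.symm)
      rw [List.erase_cons_tail (by simp only [beq_iff_eq]; omega)]
      have hch' : pvChain n prv nxt p0 (x :: t) := ⟨hpx, hx0, hxn, hpr, hnr, hc⟩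
      obtain ⟨hpj, hnj⟩ := pvChain_read n prv nxt (x :: t) p0 hch' j hj
      have hbt := (pvChain_pairwise n prv nxt t x hc).2
      have hjb := hbt j hjt
      have hpj' : pvGetI prv j = pvPredV x t j := by
        rw [hpj, pvPredV_cons_ne p0 x j t hxj]
      have hnj' : pvGetI nxt j = pvSuccV n t j := by
        rw [hnj, pvSuccV_cons_ne n x j t hxj]
      refine ⟨hpx, hx0, hxn, ?_, ?_, ?_⟩
      · by_cases hq : pvGetI nxt j < n
        · rw [if_pos hq]
          have hqt : pvGetI nxt j ∈ t := by
            rcases pvSuccV_mem n t j with h1 | h1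
            · exfalso
              rw [hnj'] at hq
              omega
            · rwa [hnj']
          have hq0 : 0 ≤ pvGetI nxt j := (hbt _ hqt).2.1
          rw [pvGetI_set_ne prv (pvGetI prv j) (pvGetI nxt j) x hq0 hx0
            (by have := (hbt _ hqt).1; omega)]
          exact hpr
        · rw [if_neg hq]
          exact hpr
      · cases t with
        | nil => simp at hjt
        | cons y t'' =>
          by_cases hyj : y = j
          · subst hyj
            have hpxv : pvGetI prv y = x := by
              rw [hpj', pvPredV_cons_self]
            rw [List.erase_cons_head, hpxv, if_pos hx0,
              pvGetI_set_self nxt (pvGetI nxt y) x hx0 (by rw [hln]; omega),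
              hnj', pvSuccV_cons_self]
          · rw [List.erase_cons_tail (by simp only [beq_iff_eq]; omega)]
            simp only [List.headD_cons]
            have hpt : pvGetI prv j ∈ y :: t'' := by
              rw [hpj', pvPredV_cons_ne x y j t'' hyj]
              rcases pvPredV_mem t'' y j with h1 | h1
              · rw [h1]
                exact List.mem_cons_self
              · exact List.mem_cons_of_mem y h1
            by_cases hp : 0 ≤ pvGetI prv j
            · rw [if_pos hp, pvGetI_set_ne nxt (pvGetI nxt j) (pvGetI prv j) x hp hx0
                (by have := (hbt _ hpt).1; omega), hnr]
              simp
            · rw [if_neg hp, hnr]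
              simp
      · exact ih x j hc hjt (by omega) hxn

-- two sorted-strict lists with the same members are equal
theorem pv_sorted_ext : ∀ (l1 l2 : List Int), l1.Pairwise (· < ·) → l2.Pairwise (· < ·) →
    (∀ x, x ∈ l1 ↔ x ∈ l2) → l1 = l2 := by
  intro l1
  induction l1 with
  | nil =>
    intro l2 _ _ hm
    cases l2 with
    | nil => rfl
    | cons y t2 => exact absurd ((hm y).mpr List.mem_cons_self) (List.not_mem_nil)
  | cons x t1 ih =>
    intro l2 h1 h2 hm
    cases l2 with
    | nil => exact absurd ((hm x).mp List.mem_cons_self) List.not_mem_nil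
    | cons y t2 =>
      obtain ⟨hlt1, h1'⟩ := List.pairwise_cons.mp h1
      obtain ⟨hlt2, h2'⟩ := List.pairwise_cons.mp h2
      have hxy : x = y := by
        have hx2 := (hm x).mp List.mem_cons_self
        have hy1 := (hm y).mpr List.mem_cons_self
        rcases List.mem_cons.mp hx2 with h | h
        · exact h
        · have hyx := hlt2 x h
          rcases List.mem_cons.mp hy1 with h' | h'
          · omega
          · have := hlt1 y h'
            omega
      subst hxy
      congr 1
      apply ih t2 h1' h2'
      intro z
      constructor
      · intro hz
        have := hlt1 z hz
        rcases List.mem_cons.mp ((hm z).mp (List.mem_cons_of_mem x hz)) with h | h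
        · omega
        · exact h
      · intro hz
        have := hlt2 z hz
        rcases List.mem_cons.mp ((hm z).mpr (List.mem_cons_of_mem x hz)) with h | h
        · omega
        · exact h

-- reading alive after the kill fold
theorem pv_alive_fold (K : List Int) : ∀ (al : List Bool) (i : Int), 0 ≤ i →
    (∀ k ∈ K, 0 ≤ k ∧ k < (al.length : Int)) →
    pvGetB (K.foldl (fun al i => PySem.List.pySetD al i false) al) i =
      (if i ∈ K then false else pvGetB al i) := by
  induction K with
  | nil => intro al i _ _; simp
  | cons k K' ih =>
    intro al i hi hK
    simp only [List.foldl_cons]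
    obtain ⟨hk0, hkl⟩ := hK k List.mem_cons_self
    rw [ih (PySem.List.pySetD al k false) i hi (by
      intro k' hk'
      have := hK k' (List.mem_cons_of_mem k hk')
      simpa [PySem.List.length_pySetD] using this)]
    by_cases hiK : i ∈ K'
    · rw [if_pos hiK, if_pos (List.mem_cons_of_mem k hiK)]
    · rw [if_neg hiK]
      by_cases hik : i = k
      · subst hik
        rw [if_pos List.mem_cons_self]
        simp only [pvGetB]
        exact pv_get_set_self al false false i hk0 hkl
      · rw [if_neg (by simp [hik, hiK])]
        simp only [pvGetB]
        exact pv_get_set_ne al false false k i hk0 hi hik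

theorem pv_alive_fold_len (K : List Int) : ∀ (al : List Bool),
    (K.foldl (fun al i => PySem.List.pySetD al i false) al).length = al.length := by
  induction K with
  | nil => intro al; rfl
  | cons k K' ih =>
    intro al
    simp only [List.foldl_cons]
    rw [ih, PySem.List.length_pySetD]

-- the splice fold: chain maintained on the survivors, neighbours of the dead collected
theorem pv_filter_erase (j : Int) (K' : List Int) :
    ∀ (L : List Int), L.Nodup →
    (L.erase j).filter (fun x => decide (x ∉ K')) =
      L.filter (fun x => decide (x ∉ j :: K')) := by
  intro L
  induction L with
  | nil => simp
  | cons x t ih =>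
    intro hnd
    obtain ⟨hx, hnd'⟩ := List.nodup_cons.mp hnd
    by_cases hxj : x = j
    · subst hxj
      rw [List.erase_cons_head, List.filter_cons_of_neg (by simp)]
      have : ∀ y ∈ t, (decide (y ∉ K')) = (decide (y ∉ x :: K')) := by
        intro y hy
        have : y ≠ x := fun h => hx (h ▸ hy)
        simp [List.mem_cons, this]
      rw [List.filter_congr this]
    · rw [List.erase_cons_tail (by simp only [beq_iff_eq]; exact hxj)]
      by_cases hxK : x ∈ K'
      · rw [List.filter_cons_of_neg (by simp [hxK]),
          List.filter_cons_of_neg (by simp [List.mem_cons, hxK]), ih hnd']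
      · rw [List.filter_cons_of_pos (by simp [hxK]),
          List.filter_cons_of_pos (by simp [List.mem_cons, hxK, hxj]), ih hnd']

theorem pv_splice_fold (n : Int) :
    ∀ (K L prv nxt nb : List Int),
    pvChain n prv nxt (-1) L → prv.length = n.toNat → nxt.length = n.toNat →
    K.Pairwise (· < ·) → (∀ k ∈ K, k ∈ L) →
    (K.foldl (pvSplice n) (prv, nxt, nb)).1.length = n.toNat ∧
    (K.foldl (pvSplice n) (prv, nxt, nb)).2.1.length = n.toNat ∧
    pvChain n (K.foldl (pvSplice n) (prv, nxt, nb)).1 (K.foldl (pvSplice n) (prv, nxt, nb)).2.1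
      (-1) (L.filter (fun x => decide (x ∉ K))) ∧
    (∀ x ∈ nb, x ∈ (K.foldl (pvSplice n) (prv, nxt, nb)).2.2) ∧
    (∀ x ∈ (K.foldl (pvSplice n) (prv, nxt, nb)).2.2, x ∈ nb ∨ (0 ≤ x ∧ x < n)) ∧
    (∀ i ∈ L, i ∉ K → (pvSuccV n L i ∈ K ∨ pvPredV (-1) L i ∈ K) →
      i ∈ (K.foldl (pvSplice n) (prv, nxt, nb)).2.2) := by
  intro K
  induction K with
  | nil =>
    intro L prv nxt nb hch hlp hln _ _
    have hfe : (L.filter (fun x => decide (x ∉ ([] : List Int)))) = L := by simp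
    simp only [List.foldl_nil, hfe]
    exact ⟨hlp, hln, hch, fun x hx => hx, fun x hx => Or.inl hx, by simp⟩
  | cons j K' ih =>
    intro L prv nxt nb hch hlp hln hKpw hKL
    obtain ⟨hKlt, hKpw'⟩ := List.pairwise_cons.mp hKpw
    have hj : j ∈ L := hKL j List.mem_cons_self
    obtain ⟨hLpw, hLb⟩ := pvChain_pairwise n prv nxt L (-1) hch
    have hLnd : L.Nodup := hLpw.imp (fun h => ne_of_lt h)
    have hLlt : ∀ x ∈ L, x < n := fun x hx => (hLb x hx).2.2
    have hj0 : 0 ≤ j := (hLb j hj).2.1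
    have hjn : j < n := (hLb j hj).2.2
    obtain ⟨hpjr, hnjr⟩ := pvChain_read n prv nxt L (-1) hch j hj
    have hnb1 : (pvSplice n (prv, nxt, nb) j) =
        ((if pvGetI nxt j < n then PySem.List.pySetD prv (pvGetI nxt j) (pvGetI prv j) else prv),
         (if 0 ≤ pvGetI prv j then PySem.List.pySetD nxt (pvGetI prv j) (pvGetI nxt j) else nxt),
         ((if 0 ≤ pvGetI prv j then nb ++ [pvGetI prv j] else nb) ++
            (if pvGetI nxt j < n then [pvGetI nxt j] else []))) := by
      unfold pvSplice
      by_cases h1 : 0 ≤ pvGetI prv j <;> by_cases h2 : pvGetI nxt j < n <;> simp [h1, h2]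
    have hch1 := pv_splice_one n prv nxt hlp hln L (-1) j hch hj (by omega) (by omega)
    have hlp1 : (if pvGetI nxt j < n then
        PySem.List.pySetD prv (pvGetI nxt j) (pvGetI prv j) else prv).length = n.toNat := by
      split <;> simp [PySem.List.length_pySetD, hlp]
    have hln1 : (if 0 ≤ pvGetI prv j then
        PySem.List.pySetD nxt (pvGetI prv j) (pvGetI nxt j) else nxt).length = n.toNat := by
      split <;> simp [PySem.List.length_pySetD, hln]
    have hK'sub : ∀ k ∈ K', k ∈ L.erase j := by
      intro k hk
      have hjk : j < k := hKlt k hk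
      exact (List.mem_erase_of_ne (by omega)).mpr (hKL k (List.mem_cons_of_mem j hk))
    have hIH := ih (L.erase j)
      (if pvGetI nxt j < n then PySem.List.pySetD prv (pvGetI nxt j) (pvGetI prv j) else prv)
      (if 0 ≤ pvGetI prv j then PySem.List.pySetD nxt (pvGetI prv j) (pvGetI nxt j) else nxt)
      ((if 0 ≤ pvGetI prv j then nb ++ [pvGetI prv j] else nb) ++
        (if pvGetI nxt j < n then [pvGetI nxt j] else []))
      hch1 hlp1 hln1 hKpw' hK'sub
    obtain ⟨ih1, ih2, ih3, ih4, ih5, ih6⟩ := hIH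
    rw [List.foldl_cons, hnb1]
    have hfe := pv_filter_erase j K' L hLnd
    refine ⟨ih1, ih2, by rwa [hfe] at ih3, ?_, ?_, ?_⟩
    · intro x hx
      apply ih4
      by_cases h1 : 0 ≤ pvGetI prv j <;> by_cases h2 : pvGetI nxt j < n <;>
        simp [h1, h2, hx]
    · intro x hx
      rcases ih5 x hx with hx1 | hx1
      · rcases List.mem_append.mp hx1 with hx2 | hx2
        · by_cases h1 : 0 ≤ pvGetI prv j
          · rw [if_pos h1] at hx2
            rcases List.mem_append.mp hx2 with hx3 | hx3
            · exact Or.inl hx3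
            · simp only [List.mem_singleton] at hx3
              subst hx3
              right
              have hpm : pvGetI prv j ∈ L := by
                rcases pvPredV_mem L (-1) j with h | h
                · exfalso
                  rw [hpjr, h] at h1
                  omega
                · rwa [hpjr]
              exact ⟨h1, hLlt _ hpm⟩
          · rw [if_neg h1] at hx2
            exact Or.inl hx2
        · by_cases h2 : pvGetI nxt j < n
          · rw [if_pos h2] at hx2
            simp only [List.mem_singleton] at hx2
            subst hx2
            right
            have hqm : pvGetI nxt j ∈ L := by
              rcases pvSuccV_mem n L j with h | h
              · exfalso
                rw [hnjr, h] at h2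
                omega
              · rwa [hnjr]
            exact ⟨(hLb _ hqm).2.1, h2⟩
          · rw [if_neg h2] at hx2
            simp at hx2
      · exact Or.inr hx1
    · intro i hi hiK hnbr
      have hij : i ≠ j := fun h => hiK (h ▸ List.mem_cons_self)
      have hiK' : i ∉ K' := fun h => hiK (List.mem_cons_of_mem j h)
      have hie : i ∈ L.erase j := (List.mem_erase_of_ne hij).mpr hi
      have hi0 : 0 ≤ i := (hLb i hi).2.1
      have hin : i < n := (hLb i hi).2.2
      by_cases hsj : pvSuccV n L i = j
      · have hpi : pvGetI prv j = i := by
          rw [hpjr]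
          exact pv_succ_pred n L (-1) i j hLnd hLlt hi hj hsj
        apply ih4
        by_cases h2 : pvGetI nxt j < n <;> simp [h2, hpi, hi0]
      · by_cases hpj : pvPredV (-1) L i = j
        · have hqi : pvGetI nxt j = i := by
            rw [hnjr]
            exact pv_pred_succ n L (-1) i j hLnd
              (fun h => by have := (hLb _ h).2.1; omega) hi hj hpj
          apply ih4
          by_cases h1 : 0 ≤ pvGetI prv j <;> simp [h1, hqi, hin]
        · apply ih6 i hie hiK'
          have hse := pvSuccV_erase n L i j hLnd hLlt hi hj hij
          have hpe := pvPredV_erase L (-1) i j hLpw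
            (fun x hx => by have := (hLb x hx).2.1; omega) hi hj hij
          rw [if_neg hsj] at hse
          rw [if_neg hpj] at hpe
          rcases hnbr with h | h
          · rcases List.mem_cons.mp h with h1 | h1
            · exact absurd h1 hsj
            · exact Or.inl (by rwa [hse])
          · rcases List.mem_cons.mp h with h1 | h1
            · exact absurd h1 hpj
            · exact Or.inr (by rwa [hpe])

-- the full invariant tying B's state to the alive-index list
def pvInv (n : Int) (a d prv nxt : List Int) (alive : List Bool) (cand L : List Int) : Prop :=
  pvChain n prv nxt (-1) L ∧
  prv.length = n.toNat ∧ nxt.length = n.toNat ∧ alive.length = n.toNat ∧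
  (∀ i : Int, 0 ≤ i → i < n → pvGetB alive i = decide (i ∈ L)) ∧
  cand.Pairwise (· < ·) ∧ (∀ i ∈ cand, 0 ≤ i ∧ i < n) ∧
  (∀ i ∈ L, i ∉ cand → pvDmgV n a L i ≤ pvGetI d i)

theorem pvDmgV_congr (n : Int) (a : List Int) (L1 L2 : List Int) (i : Int)
    (hs : pvSuccV n L1 i = pvSuccV n L2 i) (hp : pvPredV (-1) L1 i = pvPredV (-1) L2 i) :
    pvDmgV n a L1 i = pvDmgV n a L2 i := by
  unfold pvDmgV
  rw [hs, hp]

theorem pv_len_split (L : List Int) (p : Int → Bool) :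
    (L.filter p).length + (L.filter (fun x => !(p x))).length = L.length := by
  induction L with
  | nil => simp
  | cons x t ih => by_cases h : p x <;> simp [h] <;> omega

theorem pv_b_loop_eq (n : Int) (a d : List Int) : ∀ (fuel : Nat)
    (prv nxt : List Int) (alive : List Bool) (cand L rounds : List Int),
    pvInv n a d prv nxt alive cand L →
    pvBLoop n a d fuel prv nxt alive cand rounds = pvIdxLoop n a d fuel L rounds := by
  intro fuel
  induction fuel with
  | zero => intro prv nxt alive cand L rounds _; rfl
  | succ f ih =>
    intro prv nxt alive cand L rounds hinv
    obtain ⟨hch, hlp, hln, hal, halive, hcpw, hcb, hcv⟩ := hinv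
    obtain ⟨hLpw, hLb⟩ := pvChain_pairwise n prv nxt L (-1) hch
    have hLnd : L.Nodup := hLpw.imp (fun h => ne_of_lt h)
    have hLlt : ∀ x ∈ L, x < n := fun x hx => (hLb x hx).2.2
    have hdmg : ∀ x ∈ L, pvBDmg n a prv nxt x = pvDmgV n a L x := by
      intro x hx
      obtain ⟨h1, h2⟩ := pvChain_read n prv nxt L (-1) hch x hx
      unfold pvBDmg pvDmgV
      rw [h1, h2]
    have hkill : cand.filter (fun i => pvGetB alive i && decide (pvGetI d i < pvBDmg n a prv nxt i))
        = L.filter (fun i => decide (pvGetI d i < pvDmgV n a L i)) := by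
      apply pv_sorted_ext
      · exact hcpw.sublist List.filter_sublist
      · exact hLpw.sublist List.filter_sublist
      · intro x
        simp only [List.mem_filter]
        constructor
        · rintro ⟨hxc, hxp⟩
          obtain ⟨hx0, hxn⟩ := hcb x hxc
          rw [Bool.and_eq_true] at hxp
          obtain ⟨hxa, hxd⟩ := hxp
          rw [halive x hx0 hxn] at hxa
          have hxL : x ∈ L := of_decide_eq_true hxa
          refine ⟨hxL, ?_⟩
          rwa [← hdmg x hxL]
        · rintro ⟨hxL, hxd⟩
          have hx0 := (hLb x hxL).2.1
          have hxn := (hLb x hxL).2.2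
          have hlt := of_decide_eq_true hxd
          have hxc : x ∈ cand := by
            by_contra hxc
            have := hcv x hxL hxc
            omega
          refine ⟨hxc, ?_⟩
          rw [Bool.and_eq_true]
          refine ⟨by rw [halive x hx0 hxn]; exact decide_eq_true hxL, ?_⟩
          rw [hdmg x hxL]
          exact hxd
    have hlen : ((L.filter (fun i => decide (pvGetI d i < pvDmgV n a L i))).length : Int)
        = (L.length : Int) - ((L.filter (fun i => decide (pvDmgV n a L i ≤ pvGetI d i))).length : Int) := by
      have hsplit := pv_len_split L (fun i => decide (pvDmgV n a L i ≤ pvGetI d i))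
      have hcongr : (L.filter fun x => !decide (pvDmgV n a L x ≤ pvGetI d x))
          = L.filter (fun i => decide (pvGetI d i < pvDmgV n a L i)) := by
        apply List.filter_congr
        intro x hx
        simp [← decide_not, not_le]
      rw [hcongr] at hsplit
      omega
    simp only [pvBLoop, pvIdxLoop, pvIdxRound]
    rw [hkill, ← hlen]
    by_cases hstop : L.filter (fun i => decide (pvGetI d i < pvDmgV n a L i)) = []
    · rw [if_pos hstop, if_pos (by simp [hstop])]
    · have hkpos : ((L.filter (fun i => decide (pvGetI d i < pvDmgV n a L i))).length : Int) ≠ 0 := by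
        have := List.length_pos_of_ne_nil hstop
        omega
      rw [if_neg hstop, if_neg hkpos]
      -- the recursive step: build the invariant for the survivors
      have hksub : ∀ k ∈ L.filter (fun i => decide (pvGetI d i < pvDmgV n a L i)), k ∈ L :=
        fun k hk => (List.mem_filter.mp hk).1
      have hkpw : (L.filter (fun i => decide (pvGetI d i < pvDmgV n a L i))).Pairwise (· < ·) :=
        hLpw.sublist List.filter_sublist
      have hfold := pv_splice_fold n (L.filter (fun i => decide (pvGetI d i < pvDmgV n a L i)))
        L prv nxt [] hch hlp hln hkpw hksub
      obtain ⟨hf1, hf2, hf3, hf4, hf5, hf6⟩ := hfold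
      have hmemkill : ∀ x, x ∈ L.filter (fun i => decide (pvGetI d i < pvDmgV n a L i)) ↔
          (x ∈ L ∧ pvGetI d x < pvDmgV n a L x) := by
        intro x
        simp only [List.mem_filter, decide_eq_true_eq]
      have hsurv_eq : L.filter (fun x => decide (x ∉ L.filter (fun i => decide (pvGetI d i < pvDmgV n a L i))))
          = L.filter (fun i => decide (pvDmgV n a L i ≤ pvGetI d i)) := by
        apply List.filter_congr
        intro x hx
        by_cases hxk : pvGetI d x < pvDmgV n a L x
        · have hxin : x ∈ L.filter (fun i => decide (pvGetI d i < pvDmgV n a L i)) :=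
            (hmemkill x).mpr ⟨hx, hxk⟩
          simp [hxin, hxk, not_le]
        · have hxout : x ∉ L.filter (fun i => decide (pvGetI d i < pvDmgV n a L i)) :=
            fun h => hxk ((hmemkill x).mp h).2
          simp [hxout, not_lt.mp hxk]
      rw [hsurv_eq] at hf3
      apply ih
      refine ⟨hf3, hf1, hf2, ?_, ?_, ?_, ?_, ?_⟩
      · rw [pv_alive_fold_len, hal]
      · -- alive after the kill fold reads as membership in the survivors
        intro i hi0 hin
        rw [pv_alive_fold _ alive i hi0 (by
          intro k hk
          have hkL := hksub k hk
          refine ⟨(hLb k hkL).2.1, ?_⟩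
          rw [hal]
          have := (hLb k hkL).2.2
          omega)]
        by_cases hik : i ∈ L.filter (fun i => decide (pvGetI d i < pvDmgV n a L i))
        · rw [if_pos hik]
          have hd := ((hmemkill i).mp hik).2
          have : i ∉ L.filter (fun i => decide (pvDmgV n a L i ≤ pvGetI d i)) := by
            intro h
            have := of_decide_eq_true (List.mem_filter.mp h).2
            omega
          simp [this]
        · rw [if_neg hik, halive i hi0 hin]
          by_cases hiL : i ∈ L
          · have : i ∈ L.filter (fun i => decide (pvDmgV n a L i ≤ pvGetI d i)) := by
              rw [List.mem_filter]
              refine ⟨hiL, decide_eq_true ?_⟩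
              by_contra hgt
              exact hik ((hmemkill i).mpr ⟨hiL, by omega⟩)
            simp [hiL, this]
          · have : i ∉ L.filter (fun i => decide (pvDmgV n a L i ≤ pvGetI d i)) :=
              fun h => hiL (List.mem_filter.mp h).1
            simp [hiL, this]
      · exact PySem.List.sorted_ofList_pairwise_lt _
      · intro x hx
        rw [PySem.List.mem_sorted, PySem.Set.mem_ofList] at hx
        rcases hf5 x hx with h | h
        · simp at h
        · exact h
      · -- survivors not in the new candidate set keep their old (small) damage
        intro i hi hic
        have hiL : i ∈ L := (List.mem_filter.mp hi).1
        have hkeep : decide (pvDmgV n a L i ≤ pvGetI d i) = true := (List.mem_filter.mp hi).2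
        have hkeepv : pvDmgV n a L i ≤ pvGetI d i := of_decide_eq_true hkeep
        have hinb : i ∉ (List.foldl (pvSplice n) (prv, nxt, [])
            (L.filter (fun i => decide (pvGetI d i < pvDmgV n a L i)))).2.2 := by
          intro h
          exact hic (by rw [PySem.List.mem_sorted, PySem.Set.mem_ofList]; exact h)
        have hik : i ∉ L.filter (fun i => decide (pvGetI d i < pvDmgV n a L i)) := by
          intro h
          have := ((hmemkill i).mp h).2
          omega
        have hnonbr := fun hd => hinb (hf6 i hiL hik hd)
        have hsucc_nk : pvSuccV n L i ∉ L.filter (fun i => decide (pvGetI d i < pvDmgV n a L i)) :=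
          fun h => hnonbr (Or.inl h)
        have hpred_nk : pvPredV (-1) L i ∉ L.filter (fun i => decide (pvGetI d i < pvDmgV n a L i)) :=
          fun h => hnonbr (Or.inr h)
        have hsf : pvSuccV n (L.filter (fun i => decide (pvDmgV n a L i ≤ pvGetI d i))) i
            = pvSuccV n L i := by
          apply pvSuccV_filter n L _ i hLnd hLlt hiL hkeep
          rcases pvSuccV_mem n L i with h | h
          · exact Or.inl h
          · right
            refine decide_eq_true ?_
            by_contra hgt
            exact hsucc_nk ((hmemkill _).mpr ⟨h, by omega⟩)
        have hpf : pvPredV (-1) (L.filter (fun i => decide (pvDmgV n a L i ≤ pvGetI d i))) i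
            = pvPredV (-1) L i := by
          apply pvPredV_filter L _ (-1) i hLpw
            (fun x hx => by have := (hLb x hx).2.1; omega) hiL hkeep
          rcases pvPredV_mem L (-1) i with h | h
          · exact Or.inl h
          · right
            refine decide_eq_true ?_
            by_contra hgt
            exact hpred_nk ((hmemkill _).mpr ⟨h, by omega⟩)
        calc pvDmgV n a (L.filter (fun i => decide (pvDmgV n a L i ≤ pvGetI d i))) i
            = pvDmgV n a L i := pvDmgV_congr n a _ L i hsf hpf
          _ ≤ pvGetI d i := hkeepv

-- initial pointers encode the chain 0,1,…,n-1
theorem pvGetI_pyRange (a b i : Int) (h0 : 0 ≤ i) (h1 : i < b - a) :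
    pvGetI (PySem.List.pyRange a b 1) i = a + i := by
  unfold pvGetI
  rw [PySem.List.pyGetD_eq_getElem _ 0 h0
    (by rw [PySem.List.length_pyRange_one]; omega)]
  rw [PySem.List.getElem_pyRange_one]
  omega

theorem pv_init_chain (n : Int) : ∀ (k : Nat) (m : Int), 0 ≤ m → (n - m).toNat = k →
    pvChain n (PySem.List.pyRange (-1) (n - 1) 1) (PySem.List.pyRange 1 (n + 1) 1)
      (m - 1) (PySem.List.pyRange m n 1) := by
  intro k
  induction k with
  | zero =>
    intro m hm hk
    rw [PySem.List.pyRange_one_eq_nil (show n ≤ m by omega)]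
    trivial
  | succ k ih =>
    intro m hm hk
    have hmn : m < n := by omega
    rw [PySem.List.pyRange_one_cons hmn]
    refine ⟨by omega, hm, hmn, ?_, ?_, ?_⟩
    · rw [pvGetI_pyRange (-1) (n - 1) m hm (by omega)]
      omega
    · rw [pvGetI_pyRange 1 (n + 1) m hm (by omega)]
      by_cases h2 : m + 1 < n
      · rw [PySem.List.pyRange_one_cons h2]
        simp only [List.headD_cons]
        omega
      · rw [PySem.List.pyRange_one_eq_nil (by omega)]
        simp only [List.headD_nil]
        omega
    · have := ih (m + 1) (by omega) (by omega)
      simpa using this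


theorem pv_mapGetD (a : List Int) (L : List Int) (k : Nat) :
    (L.map (fun i => pvGetI a i)).getD k 0 =
      if h : k < L.length then pvGetI a (L[k]) else 0 := by
  by_cases hk : k < L.length
  · rw [dif_pos hk, List.getD_eq_getElem _ _ (by simpa using hk), List.getElem_map]
  · rw [dif_neg hk, List.getD_eq_default _ _ (by simpa using hk)]

theorem pv_mid_round_eq (n : Int) (a d : List Int) (L : List Int)
    (hnd : L.Nodup) (hb : ∀ i ∈ L, 0 ≤ i ∧ i < n) :
    pvMidRound (L.map (pvF a d)) =
      ((pvIdxRound n a d L).1.map (pvF a d), (pvIdxRound n a d L).2) := by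
  simp only [pvMidRound, pvIdxRound]
  have hatk : (L.map (pvF a d)).map (fun p => p.1) = L.map (fun i => pvGetI a i) := by
    rw [List.map_map]
    rfl
  rw [hatk]
  simp only [List.length_map]
  have hdmgl : (List.range L.length).map (fun t =>
      (if 0 < t then (L.map (fun i => pvGetI a i)).getD (t - 1) 0 else 0) +
        (L.map (fun i => pvGetI a i)).getD (t + 1) 0)
      = L.map (fun i => pvDmgV n a L i) := by
    apply List.ext_getElem (by simp)
    intro t h1 h2
    have htL : t < L.length := by simpa using h2
    simp only [List.getElem_map, List.getElem_range]
    unfold pvDmgV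
    rw [pvPredV_getElem (-1) L hnd t htL, pvSuccV_getElem n L hnd t htL]
    by_cases h0 : 0 < t
    · have ht1 : t - 1 < L.length := by omega
      rw [if_pos h0, dif_pos h0, pv_mapGetD a L (t - 1), dif_pos ht1,
        if_pos (hb _ (List.getElem_mem ht1)).1]
      by_cases hs : t + 1 < L.length
      · rw [pv_mapGetD a L (t + 1), dif_pos hs, dif_pos hs,
          if_pos (hb _ (List.getElem_mem hs)).2]
      · rw [pv_mapGetD a L (t + 1), dif_neg hs, dif_neg hs, if_neg (lt_irrefl n)]
    · rw [if_neg h0, dif_neg h0, if_neg (by omega : ¬ (0 : Int) ≤ -1)]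
      by_cases hs : t + 1 < L.length
      · rw [pv_mapGetD a L (t + 1), dif_pos hs, dif_pos hs,
          if_pos (hb _ (List.getElem_mem hs)).2]
      · rw [pv_mapGetD a L (t + 1), dif_neg hs, dif_neg hs, if_neg (lt_irrefl n)]
  rw [hdmgl, List.zip_map', List.filter_map, List.map_map]
  have hfeq : L.filter ((fun pd => decide (pd.2 ≤ pd.1.2)) ∘ fun i => (pvF a d i, pvDmgV n a L i))
      = L.filter (fun i => decide (pvDmgV n a L i ≤ pvGetI d i)) := by
    apply List.filter_congr
    intro x _
    simp [pvF, Function.comp]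
  rw [hfeq]
  simp [Function.comp_def, List.length_map]



theorem pv_mid_idx_loop_eq (n : Int) (a d : List Int) (fuel : Nat) :
    ∀ (L : List Int) (rounds : List Int), L.Nodup → (∀ i ∈ L, 0 ≤ i ∧ i < n) →
    pvMidLoop fuel (L.map (pvF a d)) rounds = pvIdxLoop n a d fuel L rounds := by
  induction fuel with
  | zero => intro L rounds _ _; rfl
  | succ f ih =>
    intro L rounds hnd hb
    simp only [pvMidLoop, pvIdxLoop, pv_mid_round_eq n a d L hnd hb]
    have hnd' : ((pvIdxRound n a d L).1).Nodup := hnd.filter _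
    have hb' : ∀ i ∈ (pvIdxRound n a d L).1, 0 ≤ i ∧ i < n :=
      fun i hi => hb i (List.mem_filter.mp hi).1
    by_cases h : (pvIdxRound n a d L).2 = 0 <;>
      simp [h, ih (pvIdxRound n a d L).1 _ hnd' hb']


-- per-test-case equality, assembled from the three layers

theorem pv_case_eq (n : Int) (a d : List Int) :
    pvALoop (((PySem.List.pyRange 0 n 1).map
        (fun i => (PySem.List.pyGetD a i 0, PySem.List.pyGetD d i 0, (0 : Int)))).length + 1)
      ((PySem.List.pyRange 0 n 1).map
        (fun i => (PySem.List.pyGetD a i 0, PySem.List.pyGetD d i 0, (0 : Int)))) [] =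
    pvBLoop n a d ((PySem.List.pyRange 0 n 1).length + 1)
      (PySem.List.pyRange (-1) (n - 1) 1) (PySem.List.pyRange 1 (n + 1) 1)
      (List.replicate n.toNat true) (PySem.List.pyRange 0 n 1) [] := by
  have hnodes : (PySem.List.pyRange 0 n 1).map
      (fun i => (PySem.List.pyGetD a i 0, PySem.List.pyGetD d i 0, (0 : Int)))
      = ((PySem.List.pyRange 0 n 1).map (pvF a d)).map pvInj := by
    rw [List.map_map]
    rfl
  have hnd : (PySem.List.pyRange 0 n 1).Nodup :=
    (PySem.List.pairwise_lt_pyRange_one 0 n).imp (fun h => ne_of_lt h)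
  have hb : ∀ i ∈ PySem.List.pyRange 0 n 1, 0 ≤ i ∧ i < n := by
    intro i hi
    exact PySem.List.mem_pyRange_one.mp hi
  have hinv : pvInv n a d (PySem.List.pyRange (-1) (n - 1) 1) (PySem.List.pyRange 1 (n + 1) 1)
      (List.replicate n.toNat true) (PySem.List.pyRange 0 n 1) (PySem.List.pyRange 0 n 1) := by
    refine ⟨?_, ?_, ?_, ?_, ?_, ?_, ?_, ?_⟩
    · have h := pv_init_chain n (n - 0).toNat 0 (by omega) rfl
      simpa using h
    · rw [PySem.List.length_pyRange_one]
      omega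
    · rw [PySem.List.length_pyRange_one]
      omega
    · simp
    · intro i hi0 hin
      have hm : i ∈ PySem.List.pyRange 0 n 1 := PySem.List.mem_pyRange_one.mpr ⟨hi0, hin⟩
      unfold pvGetB
      rw [PySem.List.pyGetD_of_nonneg _ _ hi0,
        List.getD_eq_getElem _ _ (by simp; omega), List.getElem_replicate]
      simp [hm]
    · exact PySem.List.pairwise_lt_pyRange_one 0 n
    · exact hb
    · intro i hi hic
      exact absurd hi hic
  rw [hnodes, pv_loop_eq, pv_mid_idx_loop_eq n a d _ _ [] hnd hb]
  simp only [List.length_map]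
  exact (pv_b_loop_eq n a d _ _ _ _ _ _ [] hinv).symm

-- ===== VERDICT (by name: the statement is the Claim_ definition above) =====
theorem berserk_monsters_spec : Claim_equal_berserk_monsters := by
  intro tcs _ hpre
  unfold Spec_berserk_monsters berserk_monsters berserk_monsters_alt
  rw [PySem.List.foldl_append_singleton_eq_map, PySem.List.foldl_append_singleton_eq_map]
  congr 1
  apply List.map_congr_left
  intro t _
  have hb : (PySem.List.pyRange 0 t.1 1).foldl
      (fun L i => L ++ [(PySem.List.pyGetD t.2.1 i 0, PySem.List.pyGetD t.2.2 i 0, (0 : Int))]) [] =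
      (PySem.List.pyRange 0 t.1 1).map
        (fun i => (PySem.List.pyGetD t.2.1 i 0, PySem.List.pyGetD t.2.2 i 0, (0 : Int))) := by
    rw [PySem.List.foldl_append_singleton_eq_map]
    simp
  rw [hb, pv_case_eq t.1 t.2.1 t.2.2]
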